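-- pv_equiv track=rewrite | github.com/KyawZinThant-edu/CP1404 | prac_05/wimbledon.py | get_champion_countries
-- ===== SOURCE A (Python) =====
-- def get_champion_countries(data):
--     """Get unique countries of champions in alphabetical order"""
--     countries = set()
--
--     for row in data:
--         try:
--             country = row[1]  # Champion's country is in the 2nd column
--             countries.add(country)
--         except IndexError:
--             # Row doesn't have enough columns
--             continue
--
--     return sorted(countries)
-- ===== SOURCE B (Python) =====
-- def get_champion_countries(data):
--     """Get unique countries of champions in alphabetical order"""
--     countries = []
--     for row in data:
--         try:
--             countries.append(row[1])  # Champion's country is in the 2nd column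
--         except IndexError:
--             continue
--     countries.sort()
--     result = []
--     for c in countries:
--         if not result or result[-1] != c:
--             result.append(c)
--     return result
-- ===== Notes on version B (the rewrite author's own statement) =====
-- stated objective: alternative
-- what changed: Replaces hash-set deduplication followed by sorting with collecting all countries into a plain list, sorting it, then a second pass that keeps only elements differing from the previous one (sort-then-adjacent-dedup).
import Mathlib
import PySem

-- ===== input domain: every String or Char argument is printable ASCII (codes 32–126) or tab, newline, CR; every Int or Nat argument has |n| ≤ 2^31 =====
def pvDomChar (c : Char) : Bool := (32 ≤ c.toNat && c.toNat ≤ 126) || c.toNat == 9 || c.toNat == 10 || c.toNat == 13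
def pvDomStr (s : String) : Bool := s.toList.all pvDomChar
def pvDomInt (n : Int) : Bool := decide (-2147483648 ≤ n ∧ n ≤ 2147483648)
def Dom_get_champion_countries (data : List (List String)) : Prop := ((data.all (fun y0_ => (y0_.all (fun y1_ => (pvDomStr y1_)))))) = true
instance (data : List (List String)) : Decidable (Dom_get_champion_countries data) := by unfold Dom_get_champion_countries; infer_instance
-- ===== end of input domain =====

-- B collects countries into a plain list, sorts it, and deduplicates adjacent equal
-- elements in one pass, instead of A's hash-set dedup followed by sorting (alternative
-- decomposition, same asymptotic cost).

-- ===== PORT A =====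
-- for row in data: try: countries.add(row[1]) except IndexError: continue; return sorted(countries)
def get_champion_countries (data : List (List String)) : List String :=
  let countries : PySem.Set String :=
    data.foldl (fun s row =>
      match PySem.List.pyGet? row 1 with
      | some country => PySem.Set.add s country
      | none => s) PySem.Set.empty
  PySem.List.sorted countries (fun x => x) false

-- ===== PORT B =====
def get_champion_countries_alt (data : List (List String)) : List String :=
  let countries : List String :=
    data.foldl (fun acc row =>
      match PySem.List.pyGet? row 1 with
      | some country => acc ++ [country]
      | none => acc) []
  let countries := PySem.List.sorted countries (fun x => x) false
  countries.foldl (fun result c =>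
    if result = [] ∨ PySem.List.pyGet? result (-1) ≠ some c then result ++ [c] else result) []

-- ===== PRECONDITION & SPEC =====
def Spec_get_champion_countries (data : List (List String)) (out : List String) : Prop := out = get_champion_countries_alt data
instance (data : List (List String)) (out : List String) : Decidable (Spec_get_champion_countries data out) := by unfold Spec_get_champion_countries; infer_instance

-- ===== CLAIM (what is proved, stated in full; the proofs are below) =====
def Claim_equal_get_champion_countries : Prop := ∀ (data : List (List String)), Dom_get_champion_countries data → Spec_get_champion_countries data (get_champion_countries data)

-- ===== LEMMAS AND PROOFS =====

-- the '2nd column' extractor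
def pvCol1 (row : List String) : Option String := PySem.List.pyGet? row 1

-- B's first loop is acc ++ filterMap
theorem pv_listFold (data : List (List String)) (acc : List String) :
    data.foldl (fun acc row =>
      match PySem.List.pyGet? row 1 with
      | some country => acc ++ [country]
      | none => acc) acc = acc ++ data.filterMap pvCol1 := by
  induction data generalizing acc with
  | nil => simp
  | cons r t ih =>
    simp only [List.foldl_cons, List.filterMap_cons, pvCol1]
    cases h : PySem.List.pyGet? r 1 <;> simp [ih, pvCol1]

-- A's loop builds set(filterMap)
theorem pv_setFold (data : List (List String)) (s : PySem.Set String) :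
    data.foldl (fun s row =>
      match PySem.List.pyGet? row 1 with
      | some country => PySem.Set.add s country
      | none => s) s = (data.filterMap pvCol1).foldl PySem.Set.add s := by
  induction data generalizing s with
  | nil => simp
  | cons r t ih =>
    simp only [List.foldl_cons, List.filterMap_cons, pvCol1]
    cases h : PySem.List.pyGet? r 1 <;> simp [ih, pvCol1]

-- recursive form of B's dedup pass
def pvGo (prev : String) : List String → List String
  | [] => []
  | b :: t => if b = prev then pvGo prev t else b :: pvGo b t

def pvDedupAdj : List String → List String
  | [] => []
  | a :: t => a :: pvGo a t

theorem pv_foldl_go (cs : List String) (res : List String) (p : String)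
    (hne : res ≠ []) (hl : res.getLast? = some p) :
    cs.foldl (fun result c =>
      if result = [] ∨ PySem.List.pyGet? result (-1) ≠ some c then result ++ [c] else result) res
      = res ++ pvGo p cs := by
  induction cs generalizing res p with
  | nil => simp [pvGo]
  | cons c t ih =>
    have hres : PySem.List.pyGet? res (-1) = some p := by
      rw [PySem.List.pyGet?_neg_one, hl]
    rw [List.foldl_cons]
    by_cases hc : c = p
    · subst hc
      rw [if_neg (by simp [hne, hres]), ih res c hne hl]
      simp [pvGo]
    · rw [if_pos (Or.inr (by simp [hres]; exact fun h => hc h.symm)),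
        ih (res ++ [c]) c (by simp) (by simp)]
      simp [pvGo, hc]

theorem pv_foldl_dedupAdj (cs : List String) :
    cs.foldl (fun result c =>
      if result = [] ∨ PySem.List.pyGet? result (-1) ≠ some c then result ++ [c] else result) []
      = pvDedupAdj cs := by
  cases cs with
  | nil => rfl
  | cons c t =>
    rw [List.foldl_cons, if_pos (Or.inl rfl)]
    exact pv_foldl_go t [c] c (by simp) (by simp)

theorem pvGo_subset (p : String) (cs : List String) : ∀ x ∈ pvGo p cs, x ∈ cs := by
  induction cs generalizing p with
  | nil => simp [pvGo]
  | cons c t ih =>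
    intro x hx
    simp only [pvGo] at hx
    split at hx
    · exact List.mem_cons_of_mem _ (ih p x hx)
    · rcases List.mem_cons.mp hx with h | h
      · exact h ▸ List.mem_cons_self
      · exact List.mem_cons_of_mem _ (ih c x h)

theorem pvGo_mem (p : String) (cs : List String) (h : (p :: cs).Pairwise (· ≤ ·)) :
    ∀ x, x ∈ p :: pvGo p cs ↔ x ∈ p :: cs := by
  induction cs generalizing p with
  | nil => simp [pvGo]
  | cons c t ih =>
    intro x
    have hp := List.pairwise_cons.mp h
    have hct : (c :: t).Pairwise (· ≤ ·) := hp.2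
    simp only [pvGo]
    by_cases hc : c = p
    · subst hc
      have hpt : (c :: t).Pairwise (· ≤ ·) := hct
      rw [if_pos rfl]
      have := ih c hpt x
      constructor
      · intro hx; rcases List.mem_cons.mp ((this).mp hx) with h1 | h1
        · exact h1 ▸ List.mem_cons_self
        · exact List.mem_cons_of_mem _ (List.mem_cons_of_mem _ h1)
      · intro hx
        rcases List.mem_cons.mp hx with h1 | h1
        · exact this.mpr (h1 ▸ List.mem_cons_self)
        · exact this.mpr h1
    · rw [if_neg hc]
      have := ih c hct x
      constructor
      · intro hx
        rcases List.mem_cons.mp hx with h1 | h1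
        · exact h1 ▸ List.mem_cons_self
        · exact List.mem_cons_of_mem _ (this.mp h1)
      · intro hx
        rcases List.mem_cons.mp hx with h1 | h1
        · exact h1 ▸ List.mem_cons_self
        · exact List.mem_cons_of_mem _ (this.mpr h1)

theorem pvGo_pairwise (p : String) (cs : List String) (h : (p :: cs).Pairwise (· ≤ ·)) :
    (p :: pvGo p cs).Pairwise (· < ·) := by
  induction cs generalizing p with
  | nil => simp [pvGo]
  | cons c t ih =>
    have hp := List.pairwise_cons.mp h
    have hct : (c :: t).Pairwise (· ≤ ·) := hp.2
    simp only [pvGo]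
    by_cases hc : c = p
    · subst hc
      rw [if_pos rfl]
      have hpt : (c :: t).Pairwise (· ≤ ·) := hct
      exact ih c hpt
    · rw [if_neg hc]
      have htail : (c :: pvGo c t).Pairwise (· < ·) := ih c hct
      refine List.pairwise_cons.mpr ⟨?_, htail⟩
      intro x hx
      have hpc : p < c := lt_of_le_of_ne (hp.1 c List.mem_cons_self) (fun e => hc e.symm)
      rcases List.mem_cons.mp hx with h1 | h1
      · exact h1 ▸ hpc
      · have hxt : x ∈ t := pvGo_subset c t x h1
        have hcx : c ≤ x := (List.pairwise_cons.mp hct).1 x hxt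
        exact lt_of_lt_of_le hpc hcx

theorem pvDedupAdj_mem (cs : List String) (h : cs.Pairwise (· ≤ ·)) :
    ∀ x, x ∈ pvDedupAdj cs ↔ x ∈ cs := by
  cases cs with
  | nil => simp [pvDedupAdj]
  | cons c t => exact pvGo_mem c t h

theorem pvDedupAdj_pairwise (cs : List String) (h : cs.Pairwise (· ≤ ·)) :
    (pvDedupAdj cs).Pairwise (· < ·) := by
  cases cs with
  | nil => simp [pvDedupAdj]
  | cons c t => exact pvGo_pairwise c t h

-- ===== VERDICT (by name: the statement is the Claim_ definition above) =====
theorem get_champion_countries_spec : Claim_equal_get_champion_countries := by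
  intro data _
  unfold Spec_get_champion_countries get_champion_countries get_champion_countries_alt
  simp only [pv_setFold, pv_listFold, List.nil_append]
  set cs := data.filterMap pvCol1 with hcs
  rw [pv_foldl_dedupAdj]
  have hsortpw : (PySem.List.sorted cs (fun x => x) false).Pairwise (· ≤ ·) := by
    simpa using PySem.List.sorted_pairwise (xs := cs) (key := fun x => x)
  have hofl : cs.foldl PySem.Set.add PySem.Set.empty = PySem.Set.ofList cs := rfl
  rw [hofl]
  have hpw : (pvDedupAdj (PySem.List.sorted cs (fun x => x) false)).Pairwise (· < ·) :=
    pvDedupAdj_pairwise _ hsortpw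
  have hperm : (pvDedupAdj (PySem.List.sorted cs (fun x => x) false)).Perm (PySem.Set.ofList cs) := by
    refine (List.perm_ext_iff_of_nodup hpw.nodup (PySem.Set.nodup_ofList cs)).mpr ?_
    intro x
    rw [pvDedupAdj_mem _ hsortpw x, PySem.List.mem_sorted, PySem.Set.mem_ofList]
  exact PySem.List.sorted_eq_of_perm_of_pairwise_lt _ _ _ hperm hpw
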